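-- pv_equiv track=rewrite | github.com/Lewa2424/Eva | eva_core/impact_analyzer.py | _traverse_reverse_graph
-- ===== SOURCE A (Python) =====
-- from collections import deque
--
-- def _traverse_reverse_graph(start_id: int, reverse_graph: dict[int, list[int]], max_depth: int) -> dict[int, int]:
--     discovered: dict[int, int] = {}
--     queue: deque[tuple[int, int]] = deque([(start_id, 0)])
--
--     while queue:
--         current_id, depth = queue.popleft()
--         if depth >= max_depth:
--             continue
--
--         for next_id in reverse_graph.get(current_id, []):
--             next_depth = depth + 1
--             saved_depth = discovered.get(next_id)
--             if saved_depth is not None and saved_depth <= next_depth: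
--                 continue
--
--             discovered[next_id] = next_depth
--             queue.append((next_id, next_depth))
--
--     discovered.pop(start_id, None)
--     return discovered
-- ===== SOURCE B (Python) =====
-- def _traverse_reverse_graph(start_id: int, reverse_graph: dict[int, list[int]], max_depth: int) -> dict[int, int]:
--     discovered: dict[int, int] = {}
--     frontier: list[int] = [start_id]
--     depth = 0
--     while frontier and depth < max_depth:
--         depth += 1
--         next_frontier: list[int] = []
--         for node in frontier:
--             for neighbor in reverse_graph.get(node, []):
--                 if neighbor != start_id and neighbor not in discovered:
--                     discovered[neighbor] = depth
--                     next_frontier.append(neighbor)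
--         frontier = next_frontier
--     return discovered
-- ===== Notes on version B (the rewrite author's own statement) =====
-- stated objective: simpler
-- what changed: Replaced the (node, depth) FIFO deque with per-depth-level frontier lists: a level-synchronous BFS that keeps no depths in the queue, needs no saved-depth comparison and no final pop of the start node (start is excluded up front).
import Mathlib
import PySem

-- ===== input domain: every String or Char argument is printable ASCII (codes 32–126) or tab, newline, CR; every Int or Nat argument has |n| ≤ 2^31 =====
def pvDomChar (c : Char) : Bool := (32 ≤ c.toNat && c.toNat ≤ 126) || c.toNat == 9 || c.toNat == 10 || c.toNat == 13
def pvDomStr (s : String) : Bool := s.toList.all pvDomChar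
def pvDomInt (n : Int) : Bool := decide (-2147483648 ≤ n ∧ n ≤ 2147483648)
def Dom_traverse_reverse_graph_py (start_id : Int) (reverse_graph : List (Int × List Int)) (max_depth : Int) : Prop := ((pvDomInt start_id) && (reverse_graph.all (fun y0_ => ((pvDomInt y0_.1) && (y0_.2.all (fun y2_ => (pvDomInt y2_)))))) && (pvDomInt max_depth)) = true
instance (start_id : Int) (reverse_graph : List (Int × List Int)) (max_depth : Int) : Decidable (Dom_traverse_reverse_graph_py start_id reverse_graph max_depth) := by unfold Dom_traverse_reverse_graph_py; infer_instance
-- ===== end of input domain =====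

-- B replaces A's (node, depth) FIFO deque by level-synchronous frontier lists (simpler state,
-- no saved-depth comparison, no final pop of the start node); proved to return the same dict.

-- ===== PORT A =====
-- inner `for next_id in reverse_graph.get(current_id, [])` loop of A, at next_depth `nd`;
-- state = (discovered, pairs appended to the queue so far)
def pvExpandA (D : PySem.Dict Int Int) (acc : List (Int × Int)) (nd : Int) :
    List Int → PySem.Dict Int Int × List (Int × Int)
  | [] => (D, acc)
  | n :: rest =>
    match D.get? n with
    | some saved =>
      if saved ≤ nd then pvExpandA D acc nd rest
      else pvExpandA (D.insert n nd) (acc ++ [(n, nd)]) nd rest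
    | none => pvExpandA (D.insert n nd) (acc ++ [(n, nd)]) nd rest

-- the three lemmas below are cited by pvLoopA (invariant propagation and termination measure)
lemma pvExpandA_snd (nd : Int) : ∀ (adj : List Int) (D : PySem.Dict Int Int) (acc : List (Int × Int)),
    (∀ p ∈ acc, p.2 = nd) → ∀ p ∈ (pvExpandA D acc nd adj).2, p.2 = nd := by
  intro adj
  induction adj with
  | nil => intro D acc h p hp; exact h p hp
  | cons n rest ih =>
    intro D acc h p hp
    have hacc' : ∀ p ∈ acc ++ [(n, nd)], p.2 = nd := by
      intro q hq
      rcases List.mem_append.mp hq with h1 | h1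
      · exact h q h1
      · simp at h1; simp [h1]
    cases hg : D.get? n with
    | some saved =>
      simp only [pvExpandA, hg] at hp
      by_cases hle : saved ≤ nd
      · rw [if_pos hle] at hp; exact ih D acc h p hp
      · rw [if_neg hle] at hp; exact ih _ _ hacc' p hp
    | none =>
      simp only [pvExpandA, hg] at hp
      exact ih _ _ hacc' p hp

-- potential: sum over all adjacency entries of the (clamped) stored depth; every insertion strictly decreases it
def pvPot (g : List (Int × List Int)) (md : Int) (D : PySem.Dict Int Int) : Nat :=
  ((g.flatMap Prod.snd).map (fun k => (D.getD k (md + 1)).toNat)).sum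

lemma pvPot_insert_lt (g : List (Int × List Int)) (md : Int) (D : PySem.Dict Int Int) (n nd : Int)
    (hU : n ∈ g.flatMap Prod.snd) (h1 : 1 ≤ nd) (hmd : nd ≤ md)
    (hc : D.get? n = none ∨ ∃ sv, D.get? n = some sv ∧ nd < sv) :
    pvPot g md (D.insert n nd) < pvPot g md D := by
  unfold pvPot
  apply List.sum_lt_sum
  · intro k _
    by_cases hk : k = n
    · subst hk
      rw [PySem.Dict.getD_insert]
      rcases hc with h | ⟨sv, hsv, hlt⟩
      · rw [PySem.Dict.getD_eq_get?_getD, h]; simp; omega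
      · rw [PySem.Dict.getD_eq_get?_getD, hsv]; simp; omega
    · rw [PySem.Dict.getD_insert, if_neg hk]
  · refine ⟨n, hU, ?_⟩
    rw [PySem.Dict.getD_insert]
    rcases hc with h | ⟨sv, hsv, hlt⟩
    · rw [PySem.Dict.getD_eq_get?_getD, h]; simp; omega
    · rw [PySem.Dict.getD_eq_get?_getD, hsv]; simp; omega

lemma pvExpandA_measure (g : List (Int × List Int)) (md nd : Int) (h1 : 1 ≤ nd) (hmd : nd ≤ md) :
    ∀ (adj : List Int) (D : PySem.Dict Int Int) (acc : List (Int × Int)),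
    (∀ x ∈ adj, x ∈ g.flatMap Prod.snd) →
    pvPot g md (pvExpandA D acc nd adj).1 + (pvExpandA D acc nd adj).2.length ≤
      pvPot g md D + acc.length := by
  intro adj
  induction adj with
  | nil => intro D acc _; simp [pvExpandA]
  | cons n rest ih =>
    intro D acc hU
    have hUr : ∀ x ∈ rest, x ∈ g.flatMap Prod.snd := fun x hx => hU x (List.mem_cons_of_mem _ hx)
    have hUn : n ∈ g.flatMap Prod.snd := hU n (List.mem_cons_self ..)
    cases hg : D.get? n with
    | some saved =>
      simp only [pvExpandA, hg]
      by_cases hle : saved ≤ nd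
      · rw [if_pos hle]; exact ih D acc hUr
      · rw [if_neg hle]
        have := ih (D.insert n nd) (acc ++ [(n, nd)]) hUr
        have hlt := pvPot_insert_lt g md D n nd hUn h1 hmd (Or.inr ⟨saved, hg, by omega⟩)
        simp at this ⊢
        omega
    | none =>
      simp only [pvExpandA, hg]
      have := ih (D.insert n nd) (acc ++ [(n, nd)]) hUr
      have hlt := pvPot_insert_lt g md D n nd hUn h1 hmd (Or.inl hg)
      simp at this ⊢
      omega

-- cited by pvLoopA's termination proof: an adjacency list fetched from the dict lies in the flatMap
lemma pvAdj_sub (g : List (Int × List Int)) (c : Int) :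
    ∀ x ∈ (PySem.Dict.mk g).getD c [], x ∈ g.flatMap Prod.snd := by
  intro x hx
  rw [PySem.Dict.getD_eq_get?_getD] at hx
  cases hg : (PySem.Dict.mk g).get? c with
  | none => rw [hg] at hx; simp at hx
  | some adj =>
    rw [hg] at hx
    simp at hx
    unfold PySem.Dict.get? at hg
    cases hf : List.find? (fun p => p.1 == c) g with
    | none => rw [hf] at hg; simp at hg
    | some p =>
      rw [hf] at hg
      have hm := List.mem_of_find?_eq_some hf
      simp at hg
      exact List.mem_flatMap_of_mem hm (hg ▸ hx)

-- the `while queue:` loop of A; hq (queue depths are nonnegative) is carried for termination only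
def pvLoopA (g : List (Int × List Int)) (md : Int) (D : PySem.Dict Int Int)
    (q : List (Int × Int)) (hq : ∀ p ∈ q, 0 ≤ p.2) : PySem.Dict Int Int :=
  match q, hq with
  | [], _ => D
  | (cur, depth) :: rest, hq =>
    if hstop : md ≤ depth then
      pvLoopA g md D rest (fun p hp => hq p (List.mem_cons_of_mem _ hp))
    else
      pvLoopA g md (pvExpandA D [] (depth + 1) ((PySem.Dict.mk g).getD cur [])).1
        (rest ++ (pvExpandA D [] (depth + 1) ((PySem.Dict.mk g).getD cur [])).2)
        (by
          intro p hp
          rcases List.mem_append.mp hp with h1 | h1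
          · exact hq p (List.mem_cons_of_mem _ h1)
          · have := pvExpandA_snd (depth + 1) ((PySem.Dict.mk g).getD cur []) D [] (by simp) p h1
            have hd := hq (cur, depth) (List.mem_cons_self ..)
            simp at hd
            omega)
  termination_by pvPot g md D + q.length
  decreasing_by
  · simp
  · have hd := hq (cur, depth) (List.mem_cons_self ..)
    simp only at hd
    have := pvExpandA_measure g md (depth + 1) (by omega) (by omega)
      ((PySem.Dict.mk g).getD cur []) D [] (pvAdj_sub g cur)
    simp at this ⊢
    omega

def traverse_reverse_graph_py (start_id : Int) (reverse_graph : List (Int × List Int)) (max_depth : Int) : List (Int × Int) :=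
  ((pvLoopA reverse_graph max_depth PySem.Dict.empty [(start_id, 0)]
      (by rintro ⟨a, b⟩ hp; simp at hp; omega)).erase start_id).items

-- ===== PORT B =====
-- inner `for neighbor in reverse_graph.get(node, [])` loop of B at depth `nd`
def pvInnerB (start nd : Int) (D : PySem.Dict Int Int) (acc : List Int) :
    List Int → PySem.Dict Int Int × List Int
  | [] => (D, acc)
  | n :: rest =>
    if n ≠ start ∧ D.contains n = false then pvInnerB start nd (D.insert n nd) (acc ++ [n]) rest
    else pvInnerB start nd D acc rest

-- `for node in frontier` loop of B
def pvLevelB (g : List (Int × List Int)) (start nd : Int) (D : PySem.Dict Int Int) (acc : List Int) :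
    List Int → PySem.Dict Int Int × List Int
  | [] => (D, acc)
  | node :: rest =>
    pvLevelB g start nd (pvInnerB start nd D acc ((PySem.Dict.mk g).getD node [])).1
      (pvInnerB start nd D acc ((PySem.Dict.mk g).getD node [])).2 rest

-- `while frontier and depth < max_depth` loop of B
def pvLoopB (g : List (Int × List Int)) (start md : Int) (D : PySem.Dict Int Int)
    (frontier : List Int) (depth : Int) : PySem.Dict Int Int :=
  if h : frontier ≠ [] ∧ depth < md then
    pvLoopB g start md (pvLevelB g start (depth + 1) D [] frontier).1
      (pvLevelB g start (depth + 1) D [] frontier).2 (depth + 1)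
  else D
  termination_by (md - depth).toNat
  decreasing_by omega

def traverse_reverse_graph_py_alt (start_id : Int) (reverse_graph : List (Int × List Int)) (max_depth : Int) : List (Int × Int) :=
  (pvLoopB reverse_graph start_id max_depth PySem.Dict.empty [start_id] 0).items

-- ===== PRECONDITION & SPEC =====
def Spec_traverse_reverse_graph_py (start_id : Int) (reverse_graph : List (Int × List Int)) (max_depth : Int) (out : List (Int × Int)) : Prop := out = traverse_reverse_graph_py_alt start_id reverse_graph max_depth
instance (start_id : Int) (reverse_graph : List (Int × List Int)) (max_depth : Int) (out : List (Int × Int)) : Decidable (Spec_traverse_reverse_graph_py start_id reverse_graph max_depth out) := by unfold Spec_traverse_reverse_graph_py; infer_instance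

-- ===== CLAIM (what is proved, stated in full; the proofs are below) =====
def Claim_equal_traverse_reverse_graph_py : Prop := ∀ (start_id : Int) (reverse_graph : List (Int × List Int)) (max_depth : Int), Dom_traverse_reverse_graph_py start_id reverse_graph max_depth → Spec_traverse_reverse_graph_py start_id reverse_graph max_depth (traverse_reverse_graph_py start_id reverse_graph max_depth)

-- ===== LEMMAS AND PROOFS =====

-- proof-side wrapper over pvLoopA that hides the (proof-irrelevant) termination hypothesis
def pvLoopA' (g : List (Int × List Int)) (md : Int) (D : PySem.Dict Int Int) (q : List (Int × Int)) : PySem.Dict Int Int :=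
  if h : ∀ p ∈ q, 0 ≤ p.2 then pvLoopA g md D q h else D

lemma pvLoopA'_eq (g : List (Int × List Int)) (md : Int) (D : PySem.Dict Int Int) (q : List (Int × Int)) (h : ∀ p ∈ q, 0 ≤ p.2) :
    pvLoopA g md D q h = pvLoopA' g md D q := (dif_pos h).symm

lemma pvLoopA'_nil (g : List (Int × List Int)) (md : Int) (D : PySem.Dict Int Int) : pvLoopA' g md D [] = D := by
  unfold pvLoopA'
  split
  · rw [pvLoopA]
  · rfl

lemma pvLoopA'_skip (g : List (Int × List Int)) (md cur depth : Int) (rest : List (Int × Int)) (D : PySem.Dict Int Int)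
    (hq : ∀ p ∈ (cur, depth) :: rest, 0 ≤ p.2) (hstop : md ≤ depth) :
    pvLoopA' g md D ((cur, depth) :: rest) = pvLoopA' g md D rest := by
  unfold pvLoopA'
  rw [dif_pos hq, pvLoopA, dif_pos hstop, dif_pos (fun p hp => hq p (List.mem_cons_of_mem _ hp))]

lemma pvLoopA'_exp (g : List (Int × List Int)) (md cur depth : Int) (rest : List (Int × Int)) (D : PySem.Dict Int Int)
    (hq : ∀ p ∈ (cur, depth) :: rest, 0 ≤ p.2) (hstop : ¬ md ≤ depth) :
    pvLoopA' g md D ((cur, depth) :: rest) =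
      pvLoopA' g md (pvExpandA D [] (depth + 1) ((PySem.Dict.mk g).getD cur [])).1
        (rest ++ (pvExpandA D [] (depth + 1) ((PySem.Dict.mk g).getD cur [])).2) := by
  unfold pvLoopA'
  rw [dif_pos hq, pvLoopA, dif_neg hstop, dif_pos]

-- dict facts about erase specific to how the two ports keep / omit the start entry
lemma pvErase_contains (D : PySem.Dict Int Int) (s k : Int) :
    (D.erase s).contains k = true ↔ (k ≠ s ∧ D.contains k = true) := by
  unfold PySem.Dict.erase PySem.Dict.contains
  simp only [List.any_eq_true, List.mem_filter]
  constructor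
  · rintro ⟨p, ⟨hp, hns⟩, hk⟩
    simp at hns hk
    exact ⟨hk ▸ hns, ⟨p, hp, by simp [hk]⟩⟩
  · rintro ⟨hks, p, hp, hk⟩
    simp at hk
    exact ⟨p, ⟨hp, by simp [hk, hks]⟩, by simp [hk]⟩

lemma pvErase_insert_self (D : PySem.Dict Int Int) (s v : Int) (hc : D.contains s = false) :
    (D.insert s v).erase s = D.erase s := by
  apply PySem.Dict.ext
  unfold PySem.Dict.insert PySem.Dict.erase
  rw [hc]
  simp [List.filter_append]

lemma pvErase_insert_ne (D : PySem.Dict Int Int) (s n v : Int) (hn : n ≠ s) (hc : D.contains n = false) :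
    (D.insert n v).erase s = (D.erase s).insert n v := by
  have hc' : (D.erase s).contains n = false := by
    cases h : (D.erase s).contains n
    · rfl
    · exact absurd ((pvErase_contains D s n).mp h).2 (by simp [hc])
  apply PySem.Dict.ext
  unfold PySem.Dict.insert
  rw [hc, hc']
  unfold PySem.Dict.erase
  simp [List.filter_append, hn]

-- accumulator normalization for the inner loops
lemma pvExpandA_acc (nd : Int) : ∀ (adj : List Int) (D : PySem.Dict Int Int) (acc : List (Int × Int)),
    pvExpandA D acc nd adj = ((pvExpandA D [] nd adj).1, acc ++ (pvExpandA D [] nd adj).2) := by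
  intro adj
  induction adj with
  | nil => intro D acc; simp [pvExpandA]
  | cons n rest ih =>
    intro D acc
    cases hg : D.get? n with
    | some saved =>
      simp only [pvExpandA, hg]
      by_cases hle : saved ≤ nd
      · rw [if_pos hle, if_pos hle]; exact ih D acc
      · rw [if_neg hle, if_neg hle, ih _ (acc ++ [(n, nd)]), ih _ ([] ++ [(n, nd)])]
        simp
    | none =>
      simp only [pvExpandA, hg]
      rw [ih _ (acc ++ [(n, nd)]), ih _ ([] ++ [(n, nd)])]
      simp

-- level-fold abstraction of A's queue processing (one whole level of nodes)
def pvFoldA (g : List (Int × List Int)) (nd : Int) :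
    List Int → PySem.Dict Int Int × List (Int × Int) → PySem.Dict Int Int × List (Int × Int)
  | [], st => st
  | x :: t, st => pvFoldA g nd t (pvExpandA st.1 st.2 nd ((PySem.Dict.mk g).getD x []))

lemma pvFoldA_acc (g : List (Int × List Int)) (nd : Int) : ∀ (l : List Int) (D : PySem.Dict Int Int) (acc : List (Int × Int)),
    pvFoldA g nd l (D, acc) = ((pvFoldA g nd l (D, [])).1, acc ++ (pvFoldA g nd l (D, [])).2) := by
  intro l
  induction l with
  | nil => intro D acc; simp [pvFoldA]
  | cons x t ih =>
    intro D acc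
    simp only [pvFoldA]
    rw [pvExpandA_acc nd _ D acc, pvExpandA_acc nd _ D []]
    set E := pvExpandA D [] nd ((PySem.Dict.mk g).getD x []) with hE
    simp only [List.nil_append]
    rw [ih E.1 (acc ++ E.2), ih E.1 E.2]
    simp

lemma pvExpandA_noop (nd : Int) : ∀ (adj : List Int) (D : PySem.Dict Int Int) (acc : List (Int × Int)),
    (∀ n ∈ adj, ∃ sv, D.get? n = some sv ∧ sv ≤ nd) →
    pvExpandA D acc nd adj = (D, acc) := by
  intro adj
  induction adj with
  | nil => intro D acc _; simp [pvExpandA]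
  | cons n rest ih =>
    intro D acc h
    obtain ⟨sv, hg, hle⟩ := h n (List.mem_cons_self ..)
    simp only [pvExpandA, hg, if_pos hle]
    exact ih D acc (fun m hm => h m (List.mem_cons_of_mem _ hm))

-- one neighbor-list step: A's expand (dedup by saved-depth lookup) matches B's expand
-- (dedup by membership, start skipped), through `erase start`
lemma pvExpand_corr (s nd : Int) :
    ∀ (adj : List Int) (DA DB : PySem.Dict Int Int) (accA : List (Int × Int)) (accB : List Int),
    (∀ p ∈ DA.items, p.2 ≤ nd) →
    DA.erase s = DB →
    DA.keys.Nodup →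
    accB = (accA.map Prod.fst).filter (fun n => n != s) →
    (∀ p ∈ accA, p.2 = nd) →
    (pvExpandA DA accA nd adj).1.erase s = (pvInnerB s nd DB accB adj).1 ∧
    (pvInnerB s nd DB accB adj).2 = ((pvExpandA DA accA nd adj).2.map Prod.fst).filter (fun n => n != s) ∧
    (pvExpandA DA accA nd adj).1.keys.Nodup ∧
    (∀ p ∈ (pvExpandA DA accA nd adj).1.items, p.2 ≤ nd) ∧
    (∀ p ∈ (pvExpandA DA accA nd adj).2, p.2 = nd) ∧
    (∀ k, DA.contains k = true → (pvExpandA DA accA nd adj).1.contains k = true) ∧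
    (∀ n ∈ adj, (pvExpandA DA accA nd adj).1.contains n = true) := by
  intro adj
  induction adj with
  | nil =>
    intro DA DB accA accB hval hrel hnd haB haA
    simp only [pvExpandA, pvInnerB]
    exact ⟨hrel, haB.symm ▸ rfl, hnd, hval, haA, fun k hk => hk, by simp⟩
  | cons n rest ih =>
    intro DA DB accA accB hval hrel hnd haB haA
    cases hg : DA.get? n with
    | some saved =>
      have hsle : saved ≤ nd := hval _ (PySem.Dict.mem_items_of_get?_eq_some _ hg)
      have hcA : DA.contains n = true := by rw [PySem.Dict.contains_eq_isSome_get?, hg]; rfl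
      have hBskip : ¬ (n ≠ s ∧ DB.contains n = false) := by
        by_cases hns : n = s
        · simp [hns]
        · have : DB.contains n = true := by
            rw [← hrel]; exact (pvErase_contains DA s n).mpr ⟨hns, hcA⟩
          simp [this]
      simp only [pvExpandA, pvInnerB, hg, if_pos hsle, if_neg hBskip]
      obtain ⟨c1, c2, c3, c4, c5, c6, c7⟩ := ih DA DB accA accB hval hrel hnd haB haA
      refine ⟨c1, c2, c3, c4, c5, c6, ?_⟩
      intro m hm
      rcases List.mem_cons.mp hm with rfl | hm
      · exact c6 m hcA
      · exact c7 m hm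
    | none =>
      have hcA : DA.contains n = false := by
        rw [PySem.Dict.contains_eq_isSome_get?, hg]; rfl
      have hvals' : ∀ p ∈ (DA.insert n nd).items, p.2 ≤ nd := by
        intro p hp
        rcases (PySem.Dict.mem_items_insert _ _ _ _).mp hp with rfl | ⟨hp, _⟩
        · exact le_refl nd
        · exact hval p hp
      have hnd' : (DA.insert n nd).keys.Nodup := PySem.Dict.nodup_keys_insert DA n nd hnd
      have haA' : ∀ p ∈ accA ++ [(n, nd)], p.2 = nd := by
        intro p hp
        rcases List.mem_append.mp hp with h1 | h1
        · exact haA p h1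
        · simp at h1; simp [h1]
      by_cases hns : n = s
      · subst hns
        have hBskip : ¬ (n ≠ n ∧ DB.contains n = false) := by simp
        simp only [pvExpandA, pvInnerB, hg, if_neg hBskip]
        have hrel' : (DA.insert n nd).erase n = DB := by
          rw [pvErase_insert_self DA n nd hcA]; exact hrel
        have haB' : accB = ((accA ++ [(n, nd)]).map Prod.fst).filter (fun m => m != n) := by
          simp [List.filter_append, haB]
        obtain ⟨c1, c2, c3, c4, c5, c6, c7⟩ :=
          ih (DA.insert n nd) DB (accA ++ [(n, nd)]) accB hvals' hrel' hnd' haB' haA'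
        refine ⟨c1, c2, c3, c4, c5, ?_, ?_⟩
        · intro k hk
          exact c6 k (by rw [PySem.Dict.contains_insert]; simp [hk])
        · intro m hm
          rcases List.mem_cons.mp hm with rfl | hm
          · exact c6 m (PySem.Dict.contains_insert_self DA m nd)
          · exact c7 m hm
      · have hcB : DB.contains n = false := by
          cases h : DB.contains n
          · rfl
          · rw [← hrel] at h
            exact absurd ((pvErase_contains DA s n).mp h).2 (by simp [hcA])
        have hBtake : (n ≠ s ∧ DB.contains n = false) := ⟨hns, hcB⟩
        simp only [pvExpandA, pvInnerB, hg, if_pos hBtake]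
        have hrel' : (DA.insert n nd).erase s = DB.insert n nd := by
          rw [pvErase_insert_ne DA s n nd hns hcA, hrel]
        have haB' : accB ++ [n] = ((accA ++ [(n, nd)]).map Prod.fst).filter (fun m => m != s) := by
          simp [List.filter_append, haB, hns]
        obtain ⟨c1, c2, c3, c4, c5, c6, c7⟩ :=
          ih (DA.insert n nd) (DB.insert n nd) (accA ++ [(n, nd)]) (accB ++ [n]) hvals' hrel' hnd' haB' haA'
        refine ⟨c1, c2, c3, c4, c5, ?_, ?_⟩
        · intro k hk
          exact c6 k (by rw [PySem.Dict.contains_insert]; simp [hk])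
        · intro m hm
          rcases List.mem_cons.mp hm with rfl | hm
          · exact c6 m (PySem.Dict.contains_insert_self DA m nd)
          · exact c7 m hm

-- one whole level: A's fold over the frontier matches B's pvLevelB over the
-- same frontier with `start` filtered out (expanding `start` again is a no-op)
lemma pvLevel_corr (g : List (Int × List Int)) (s nd : Int) :
    ∀ (fA : List Int) (DA DB : PySem.Dict Int Int) (accA : List (Int × Int)) (accB : List Int),
    (∀ p ∈ DA.items, p.2 ≤ nd) →
    DA.erase s = DB →
    DA.keys.Nodup →
    accB = (accA.map Prod.fst).filter (fun n => n != s) →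
    (∀ p ∈ accA, p.2 = nd) →
    (∀ n ∈ (PySem.Dict.mk g).getD s [], DA.contains n = true) →
    (pvFoldA g nd fA (DA, accA)).1.erase s = (pvLevelB g s nd DB accB (fA.filter (fun n => n != s))).1 ∧
    (pvLevelB g s nd DB accB (fA.filter (fun n => n != s))).2 =
      ((pvFoldA g nd fA (DA, accA)).2.map Prod.fst).filter (fun n => n != s) ∧
    (pvFoldA g nd fA (DA, accA)).1.keys.Nodup ∧
    (∀ p ∈ (pvFoldA g nd fA (DA, accA)).1.items, p.2 ≤ nd) ∧
    (∀ p ∈ (pvFoldA g nd fA (DA, accA)).2, p.2 = nd) ∧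
    (∀ n ∈ (PySem.Dict.mk g).getD s [], (pvFoldA g nd fA (DA, accA)).1.contains n = true) := by
  intro fA
  induction fA with
  | nil =>
    intro DA DB accA accB hval hrel hnd haB haA hcov
    simp only [pvFoldA, List.filter_nil, pvLevelB]
    exact ⟨hrel, haB, hnd, hval, haA, hcov⟩
  | cons x t ih =>
    intro DA DB accA accB hval hrel hnd haB haA hcov
    by_cases hxs : x = s
    · subst hxs
      have hfilter : (x :: t).filter (fun n => n != x) = t.filter (fun n => n != x) := by simp
      have hnoop : pvExpandA DA accA nd ((PySem.Dict.mk g).getD x []) = (DA, accA) := by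
        apply pvExpandA_noop
        intro n hn
        have hc := hcov n hn
        rw [PySem.Dict.contains_eq_isSome_get?] at hc
        cases hg : DA.get? n with
        | none => rw [hg] at hc; simp at hc
        | some sv =>
          exact ⟨sv, rfl, hval _ (PySem.Dict.mem_items_of_get?_eq_some _ hg)⟩
      rw [hfilter]
      simp only [pvFoldA, hnoop]
      exact ih DA DB accA accB hval hrel hnd haB haA hcov
    · have hfilter : (x :: t).filter (fun n => n != s) = x :: t.filter (fun n => n != s) := by
        simp [hxs]
      rw [hfilter]
      obtain ⟨c1, c2, c3, c4, c5, c6, c7⟩ :=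
        pvExpand_corr s nd ((PySem.Dict.mk g).getD x []) DA DB accA accB hval hrel hnd haB haA
      simp only [pvFoldA, pvLevelB]
      exact ih (pvExpandA DA accA nd ((PySem.Dict.mk g).getD x [])).1
        (pvInnerB s nd DB accB ((PySem.Dict.mk g).getD x [])).1
        (pvExpandA DA accA nd ((PySem.Dict.mk g).getD x [])).2
        (pvInnerB s nd DB accB ((PySem.Dict.mk g).getD x [])).2
        c4 c1 c3 c2 c5 (fun n hn => c6 n (hcov n hn))

-- A's loop ignores every queue entry at depth ≥ max_depth
lemma pvLoopA'_skipAll (g : List (Int × List Int)) (md : Int) :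
    ∀ (q : List (Int × Int)) (D : PySem.Dict Int Int),
    (∀ p ∈ q, 0 ≤ p.2) → (∀ p ∈ q, md ≤ p.2) → pvLoopA' g md D q = D := by
  intro q
  induction q with
  | nil => intro D _ _; exact pvLoopA'_nil g md D
  | cons p rest ih =>
    intro D hq hmd
    obtain ⟨c, d⟩ := p
    rw [pvLoopA'_skip g md c d rest D hq (hmd (c, d) (List.mem_cons_self ..))]
    exact ih D (fun p hp => hq p (List.mem_cons_of_mem _ hp)) (fun p hp => hmd p (List.mem_cons_of_mem _ hp))

-- a queue holding only re-discovered `start` entries does nothing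
lemma pvLoopA'_allstart (g : List (Int × List Int)) (md s c : Int) :
    ∀ (q : List (Int × Int)) (D : PySem.Dict Int Int),
    (∀ p ∈ q, 0 ≤ p.2) → (∀ p ∈ q, p.1 = s) → (∀ p ∈ q, c ≤ p.2 + 1) →
    (∀ p ∈ D.items, p.2 ≤ c) →
    (∀ n ∈ (PySem.Dict.mk g).getD s [], D.contains n = true) →
    pvLoopA' g md D q = D := by
  intro q
  induction q with
  | nil => intro D _ _ _ _ _; exact pvLoopA'_nil g md D
  | cons p rest ih =>
    intro D hq0 hqs hqc hval hcov
    obtain ⟨x, d⟩ := p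
    have hxs : x = s := hqs (x, d) (List.mem_cons_self ..)
    subst hxs
    have htl0 := fun p hp => hq0 p (List.mem_cons_of_mem _ hp)
    have htls := fun p hp => hqs p (List.mem_cons_of_mem _ hp)
    have htlc := fun p hp => hqc p (List.mem_cons_of_mem _ hp)
    by_cases hmd : md ≤ d
    · rw [pvLoopA'_skip g md x d rest D hq0 hmd]
      exact ih D htl0 htls htlc hval hcov
    · have hnoop : pvExpandA D [] (d + 1) ((PySem.Dict.mk g).getD x []) = (D, []) := by
        apply pvExpandA_noop
        intro n hn
        have hc := hcov n hn
        rw [PySem.Dict.contains_eq_isSome_get?] at hc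
        cases hg : D.get? n with
        | none => rw [hg] at hc; simp at hc
        | some sv =>
          refine ⟨sv, rfl, ?_⟩
          have := hval _ (PySem.Dict.mem_items_of_get?_eq_some _ hg)
          have := hqc (x, d) (List.mem_cons_self ..)
          simp at this
          omega
      rw [pvLoopA'_exp g md x d rest D hq0 hmd, hnoop]
      simp only [List.append_nil]
      exact ih D htl0 htls htlc hval hcov

-- processing one level of the queue is the level-fold
lemma pvLoopA'_shift (g : List (Int × List Int)) (md depth : Int) (hlt : ¬ md ≤ depth) (h0 : 0 ≤ depth) :
    ∀ (l1 : List Int) (l2 : List (Int × Int)) (D : PySem.Dict Int Int),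
    (∀ p ∈ l2, 0 ≤ p.2) →
    pvLoopA' g md D (l1.map (fun x => (x, depth)) ++ l2) =
      pvLoopA' g md (pvFoldA g (depth + 1) l1 (D, [])).1 (l2 ++ (pvFoldA g (depth + 1) l1 (D, [])).2) := by
  intro l1
  induction l1 with
  | nil =>
    intro l2 D _
    simp only [pvFoldA, List.map_nil, List.nil_append, List.append_nil]
  | cons x t ih =>
    intro l2 D hl2
    have hq : ∀ p ∈ (x, depth) :: (t.map (fun x => (x, depth)) ++ l2), 0 ≤ p.2 := by
      intro p hp
      rcases List.mem_cons.mp hp with rfl | hp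
      · exact h0
      · rcases List.mem_append.mp hp with h1 | h1
        · obtain ⟨y, _, rfl⟩ := List.mem_map.mp h1; exact h0
        · exact hl2 p h1
    rw [List.map_cons, List.cons_append, pvLoopA'_exp g md x depth _ D hq hlt]
    set r := pvExpandA D [] (depth + 1) ((PySem.Dict.mk g).getD x []) with hr
    have hr2 : ∀ p ∈ r.2, 0 ≤ p.2 := by
      intro p hp
      have := pvExpandA_snd (depth + 1) ((PySem.Dict.mk g).getD x []) D [] (by simp) p hp
      omega
    rw [List.append_assoc]
    rw [ih (l2 ++ r.2) r.1 (by
      intro p hp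
      rcases List.mem_append.mp hp with h1 | h1
      · exact hl2 p h1
      · exact hr2 p h1)]
    have hfold : pvFoldA g (depth + 1) (x :: t) (D, []) =
        ((pvFoldA g (depth + 1) t (r.1, [])).1, r.2 ++ (pvFoldA g (depth + 1) t (r.1, [])).2) := by
      simp only [pvFoldA]
      rw [← hr]
      rw [show r = (r.1, r.2) from rfl]
      exact pvFoldA_acc g (depth + 1) t r.1 r.2
    rw [hfold]
    simp only [List.append_assoc]

-- next-level queue entries all carry depth nd
lemma pvPairs_eq (c : Int) : ∀ (l : List (Int × Int)), (∀ p ∈ l, p.2 = c) →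
    l = (l.map Prod.fst).map (fun x => (x, c)) := by
  intro l
  induction l with
  | nil => intro _; rfl
  | cons p t ih =>
    intro h
    obtain ⟨a, b⟩ := p
    have hb : b = c := h (a, b) (List.mem_cons_self ..)
    subst hb
    have htl := ih (fun p hp => h p (List.mem_cons_of_mem _ hp))
    simp only [List.map_cons]
    rw [← htl]

-- main induction over the levels
lemma pvLevels (g : List (Int × List Int)) (md s : Int) :
    ∀ (k : Nat) (depth : Int) (DA DB : PySem.Dict Int Int) (fA : List Int),
    (md - depth).toNat ≤ k → 0 ≤ depth →
    (∀ p ∈ DA.items, p.2 ≤ depth) →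
    DA.erase s = DB →
    DA.keys.Nodup →
    (∀ n ∈ (PySem.Dict.mk g).getD s [], DA.contains n = true) →
    (pvLoopA' g md DA (fA.map (fun x => (x, depth)))).erase s =
      pvLoopB g s md DB (fA.filter (fun n => n != s)) depth := by
  intro k
  induction k with
  | zero =>
    intro depth DA DB fA hk h0 hval hrel hnd hcov
    have hmd : md ≤ depth := by omega
    rw [pvLoopA'_skipAll g md _ DA
      (by intro p hp; obtain ⟨y, _, rfl⟩ := List.mem_map.mp hp; exact h0)
      (by intro p hp; obtain ⟨y, _, rfl⟩ := List.mem_map.mp hp; exact hmd)]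
    rw [pvLoopB, dif_neg (by push Not; intro _; omega)]
    exact hrel
  | succ k ih =>
    intro depth DA DB fA hk h0 hval hrel hnd hcov
    by_cases hmd : md ≤ depth
    · rw [pvLoopA'_skipAll g md _ DA
        (by intro p hp; obtain ⟨y, _, rfl⟩ := List.mem_map.mp hp; exact h0)
        (by intro p hp; obtain ⟨y, _, rfl⟩ := List.mem_map.mp hp; exact hmd)]
      rw [pvLoopB, dif_neg (by push Not; intro _; omega)]
      exact hrel
    · -- process the level via the fold, then recurse
      rw [← List.append_nil (fA.map (fun x => (x, depth)))]
      rw [pvLoopA'_shift g md depth hmd h0 fA [] DA (by simp)]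
      simp only [List.nil_append]
      obtain ⟨c1, c2, c3, c4, c5, c6⟩ :=
        pvLevel_corr g s (depth + 1) fA DA DB [] []
          (fun p hp => by have := hval p hp; omega) hrel hnd (by simp) (by simp) hcov
      set FA := pvFoldA g (depth + 1) fA (DA, []) with hFA
      set FB := pvLevelB g s (depth + 1) DB [] (fA.filter (fun n => n != s)) with hFB
      by_cases hfB : (fA.filter (fun n => n != s)) = []
      · -- B stops; A's residual queue holds only `start` entries and does nothing
        rw [pvLoopB, dif_neg (by push Not; intro h; exact absurd hfB h)]
        have hFBnil : FB = (DB, []) := by rw [hFB, hfB]; rfl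
        have hstart : ∀ p ∈ FA.2, p.1 = s := by
          intro p hp
          by_contra hne
          have hmem : p.1 ∈ (FA.2.map Prod.fst).filter (fun n => n != s) := by
            rw [List.mem_filter]
            exact ⟨List.mem_map_of_mem hp, by simp [hne]⟩
          rw [← c2, hFBnil] at hmem
          simp at hmem
        rw [pvLoopA'_allstart g md s (depth + 1) FA.2 FA.1
          (fun p hp => by have := c5 p hp; omega)
          hstart
          (fun p hp => by have := c5 p hp; omega)
          c4 c6]
        rw [c1, hFBnil]
      · rw [pvLoopB, dif_pos ⟨hfB, by omega⟩]
        rw [pvPairs_eq (depth + 1) FA.2 c5]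
        rw [ih (depth + 1) FA.1 FB.1 (FA.2.map Prod.fst) (by omega) (by omega) c4 c1 c3 c6]
        rw [← c2]

theorem traverse_reverse_graph_py_spec : Claim_equal_traverse_reverse_graph_py := by
  intro s g md _
  unfold Spec_traverse_reverse_graph_py traverse_reverse_graph_py traverse_reverse_graph_py_alt
  rw [pvLoopA'_eq]
  have hq0 : ∀ p ∈ ([(s, 0)] : List (Int × Int)), 0 ≤ p.2 := by
    rintro ⟨a, b⟩ hp; simp at hp; omega
  by_cases hmd : md ≤ 0
  · rw [pvLoopA'_skip g md s 0 [] PySem.Dict.empty hq0 hmd, pvLoopA'_nil]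
    rw [pvLoopB, dif_neg (by push Not; intro _; omega)]
    rfl
  · rw [pvLoopA'_exp g md s 0 [] PySem.Dict.empty hq0 hmd]
    rw [pvLoopB, dif_pos ⟨by simp, by omega⟩]
    simp only [List.nil_append, zero_add, pvLevelB]
    have hempitems : ∀ p ∈ (PySem.Dict.empty : PySem.Dict Int Int).items, p.2 ≤ (1 : Int) := by
      intro p hp; simp [PySem.Dict.empty] at hp
    have hemprel : (PySem.Dict.empty : PySem.Dict Int Int).erase s = PySem.Dict.empty := rfl
    have hempnd : (PySem.Dict.empty : PySem.Dict Int Int).keys.Nodup := by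
      simp [PySem.Dict.empty, PySem.Dict.keys]
    obtain ⟨c1, c2, c3, c4, c5, c6, c7⟩ :=
      pvExpand_corr s 1 ((PySem.Dict.mk g).getD s []) PySem.Dict.empty PySem.Dict.empty [] []
        hempitems hemprel hempnd (by simp) (by simp)
    have hmain := pvLevels g md s (md - 1).toNat 1
      (pvExpandA PySem.Dict.empty [] 1 ((PySem.Dict.mk g).getD s [])).1
      (pvInnerB s 1 PySem.Dict.empty [] ((PySem.Dict.mk g).getD s [])).1
      ((pvExpandA PySem.Dict.empty [] 1 ((PySem.Dict.mk g).getD s [])).2.map Prod.fst)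
      (by omega) (by omega) c4 c1 c3 c7
    rw [← pvPairs_eq 1 _ c5, ← c2] at hmain
    exact congrArg PySem.Dict.items hmain
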